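-- pv_equiv track=rewrite | github.com/gustavnorens/aoc-2023 | solutions/problem13.py | parse
-- ===== SOURCE A (Python) =====
-- def parse(input):
--     matrices = []
--     matrix = []
--     for line in input:
--         if line != "":
--             matrix.append([c for c in line])
--         else:
--             matrices.append(matrix)
--             matrix = []
--     matrices.append(matrix)
--     return matrices
-- ===== SOURCE B (Python) =====
-- def parse(input):
--     lines = list(input)
--     sep = [i for i, l in enumerate(lines) if l == ""]
--     bounds = [-1] + sep + [len(lines)]
--     return [[list(c) for c in lines[a + 1:b]] for a, b in zip(bounds, bounds[1:])]
-- ===== Notes on version B (the rewrite author's own statement) =====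
-- stated objective: alternative
-- what changed: B first collects the blank-line positions with one enumerate pass and then slices the line list between consecutive boundaries ([-1]+sep+[len]), instead of A's accumulate-and-flush loop.
import Mathlib
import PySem

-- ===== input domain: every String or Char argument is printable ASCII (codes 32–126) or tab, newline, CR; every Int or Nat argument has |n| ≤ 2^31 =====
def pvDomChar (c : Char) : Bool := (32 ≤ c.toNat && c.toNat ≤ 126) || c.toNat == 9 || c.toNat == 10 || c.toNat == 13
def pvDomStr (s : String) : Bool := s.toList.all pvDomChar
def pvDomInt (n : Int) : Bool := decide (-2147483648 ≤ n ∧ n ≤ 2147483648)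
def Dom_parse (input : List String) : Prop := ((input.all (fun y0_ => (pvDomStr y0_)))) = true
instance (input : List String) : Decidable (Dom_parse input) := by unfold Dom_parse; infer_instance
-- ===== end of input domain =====

-- B splits the line list at the blank-line positions found by one enumerate pass, instead of A's accumulate-and-flush loop (alternative decomposition, same cost).

-- [c for c in line] : a line as a list of one-character strings (exact for any characters)
def lineChars (l : String) : List String := l.toList.map (fun c => String.ofList [c])

-- ===== PORT A =====
-- the for-loop over input with state (matrices, matrix)
def parseGo : List String → List (List (List String)) → List (List String) → List (List (List String))
  | [], ms, m => ms ++ [m]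
  | l :: rest, ms, m =>
    if l ≠ "" then parseGo rest ms (m ++ [lineChars l])
    else parseGo rest (ms ++ [m]) []

def parse (input : List String) : List (List (List String)) :=
  parseGo input [] []

-- ===== PORT B =====
-- sep = [i for i, l in enumerate(lines) if l == ""]
def sepIdx (lines : List String) : List Int :=
  ((PySem.List.enumerate lines 0).filter (fun p => p.2 == "")).map (·.1)

def parse_alt (input : List String) : List (List (List String)) :=
  let lines := input
  let sep := sepIdx lines
  let bounds : List Int := [-1] ++ sep ++ [(lines.length : Int)]
  (bounds.zip bounds.tail).map (fun p =>
    (PySem.List.slice lines (some (p.1 + 1)) (some p.2)).map lineChars)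

-- ===== PRECONDITION & SPEC =====
def Spec_parse (input : List String) (out : List (List (List String))) : Prop := out = parse_alt input
instance (input : List String) (out : List (List (List String))) : Decidable (Spec_parse input out) := by unfold Spec_parse; infer_instance

-- ===== CLAIM (what is proved, stated in full; the proofs are below) =====
def Claim_equal_parse : Prop := ∀ (input : List String), Dom_parse input → Spec_parse input (parse input)

-- ===== LEMMAS AND PROOFS =====

-- canonical recursive splitting, the bridge between the two ports
def groups : List String → List (List String)
  | [] => [[]]
  | l :: rest =>
    if l = "" then [] :: groups rest
    else match groups rest with
      | [] => [[l]]
      | g :: gs => (l :: g) :: gs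

theorem groups_ne_nil (xs : List String) : groups xs ≠ [] := by
  cases xs with
  | nil => simp [groups]
  | cons l rest =>
    simp only [groups]
    split
    · simp
    · cases h : groups rest <;> simp

-- ===== A-side =====
theorem parseGo_eq (input : List String) :
    ∀ (ms : List (List (List String))) (m : List (List String)),
      parseGo input ms m =
        ms ++ ((groups input).map (List.map lineChars)).modifyHead (m ++ ·) := by
  induction input with
  | nil => intro ms m; simp [parseGo, groups]
  | cons l rest ih =>
    intro ms m
    by_cases hl : l = ""
    · subst hl
      simp only [parseGo, groups, ne_eq, not_true_eq_false, if_false]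
      rw [ih]
      simp [List.modifyHead, List.map]
      cases h : (groups rest).map (List.map lineChars) with
      | nil => exact absurd (by simpa using h) (groups_ne_nil rest)
      | cons g gs => simp
    · rw [parseGo, if_pos hl, ih]
      obtain ⟨g, gs, hg⟩ : ∃ g gs, groups rest = g :: gs := by
        cases h : groups rest with
        | nil => exact absurd h (groups_ne_nil rest)
        | cons g gs => exact ⟨g, gs, rfl⟩
      simp [groups, hl, hg, List.modifyHead]

theorem parse_eq_groups (input : List String) :
    parse input = (groups input).map (List.map lineChars) := by
  rw [parse, parseGo_eq]
  cases h : (groups input).map (List.map lineChars) with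
  | nil => exact absurd (by simpa using h) (groups_ne_nil input)
  | cons g gs => simp

-- ===== B-side =====
theorem sepIdx_nonneg (lines : List String) : ∀ x ∈ sepIdx lines, 0 ≤ x := by
  intro x hx
  simp only [sepIdx, List.mem_map, List.mem_filter] at hx
  obtain ⟨p, ⟨hp, _⟩, rfl⟩ := hx
  rw [PySem.List.mem_enumerate_iff] at hp
  obtain ⟨k, _, rfl⟩ := hp
  simp

theorem enumerate_shift {α : Type} (xs : List α) (s : Int) :
    PySem.List.enumerate xs (s + 1) = (PySem.List.enumerate xs s).map (fun p => (p.1 + 1, p.2)) := by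
  induction xs generalizing s with
  | nil => simp [PySem.List.enumerate_nil]
  | cons x xs ih => simp [PySem.List.enumerate_cons, ih]

theorem sepIdx_cons (l : String) (rest : List String) :
    sepIdx (l :: rest) =
      (if l = "" then [(0 : Int)] else []) ++ (sepIdx rest).map (· + 1) := by
  have hsh : PySem.List.enumerate rest 1 = (PySem.List.enumerate rest 0).map (fun p => (p.1 + 1, p.2)) := by
    simpa using enumerate_shift rest 0
  simp only [sepIdx, PySem.List.enumerate_cons, zero_add, hsh,
    List.filter_cons, List.filter_map, List.map_map]
  by_cases hl : l = "" <;> simp [hl, Function.comp_def]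

-- the raw slices B takes between consecutive boundaries
def slicesB (lines : List String) (bounds : List Int) : List (List String) :=
  (bounds.zip bounds.tail).map (fun p => PySem.List.slice lines (some (p.1 + 1)) (some p.2))

theorem slice_cons_shift (l : String) (rest : List String) (a b : Int)
    (ha : -1 ≤ a) (hb : 0 ≤ b) :
    PySem.List.slice (l :: rest) (some (a + 1 + 1)) (some (b + 1)) =
      PySem.List.slice rest (some (a + 1)) (some b) := by
  have ha1 : (0:Int) ≤ a + 1 := by omega
  rw [PySem.List.slice_toNat _ (by omega : (0:Int) ≤ a + 1 + 1) (by omega : (0:Int) ≤ b + 1),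
      PySem.List.slice_toNat _ ha1 hb]
  have h1 : (a + 1 + 1).toNat = (a + 1).toNat + 1 := by omega
  have h2 : (b + 1).toNat = b.toNat + 1 := by omega
  rw [h1, h2, List.drop_succ_cons]
  congr 1
  omega

theorem slicesB_cons (lines : List String) (a b : Int) (cs : List Int) :
    slicesB lines (a :: b :: cs) =
      PySem.List.slice lines (some (a + 1)) (some b) :: slicesB lines (b :: cs) := by
  simp [slicesB]

theorem slicesB_shift (l : String) (rest : List String) (bs : List Int)
    (h1 : ∀ x ∈ bs, -1 ≤ x) (h2 : ∀ x ∈ bs.tail, 0 ≤ x) :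
    slicesB (l :: rest) (bs.map (· + 1)) = slicesB rest bs := by
  unfold slicesB
  rw [← List.map_tail, List.zip_map, List.map_map]
  apply List.map_congr_left
  intro p hp
  obtain ⟨hp1, hp2⟩ := List.of_mem_zip hp
  simpa [Prod.map] using slice_cons_shift l rest p.1 p.2 (h1 _ hp1) (h2 _ hp2)

theorem slice_cons_zero (l : String) (rest : List String) (b : Int) (hb : 0 ≤ b) :
    PySem.List.slice (l :: rest) (some 0) (some (b + 1)) =
      l :: PySem.List.slice rest (some 0) (some b) := by
  rw [PySem.List.slice_toNat _ le_rfl (by omega : (0:Int) ≤ b + 1),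
      PySem.List.slice_toNat _ le_rfl hb]
  have : (b + 1).toNat = b.toNat + 1 := by omega
  simp [this]

theorem slicesB_eq_groups (lines : List String) :
    slicesB lines (-1 :: (sepIdx lines ++ [(lines.length : Int)])) = groups lines := by
  induction lines with
  | nil => decide
  | cons l rest ih =>
    have hsep := sepIdx_nonneg rest
    have hlen : (0:Int) ≤ (rest.length : Int) := by positivity
    have hS : ∀ x ∈ sepIdx rest ++ [(rest.length : Int)], 0 ≤ x := by
      intro x hx
      rcases List.mem_append.mp hx with h | h
      · exact hsep x h
      · simpa using (by simpa using h : x = (rest.length : Int)) ▸ hlen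
    by_cases hl : l = ""
    · subst hl
      have hb : (-1 : Int) :: (sepIdx ("" :: rest) ++ [((("" :: rest) : List String).length : Int)]) =
          -1 :: ((-1 :: (sepIdx rest ++ [(rest.length : Int)])).map (· + 1)) := by
        simp [sepIdx_cons]
      rw [hb]
      have hmap : ((-1 : Int) :: (sepIdx rest ++ [(rest.length : Int)])).map (· + 1) =
          0 :: (sepIdx rest ++ [(rest.length : Int)]).map (· + 1) := by simp
      rw [hmap, slicesB_cons, ← hmap,
        slicesB_shift "" rest _ (by intro x hx; rcases List.mem_cons.mp hx with h | h
                                    · omega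
                                    · exact le_trans (by omega) (hS x h))
          (by simpa using hS), ih]
      have h00 : PySem.List.slice ("" :: rest) (some (-1 + 1)) (some 0) = [] := by
        rw [(by omega : (-1 : Int) + 1 = 0), PySem.List.slice_toNat _ le_rfl le_rfl]
        simp
      rw [h00]
      simp [groups]
    · obtain ⟨s0, ss, hSc⟩ := List.exists_cons_of_ne_nil
        (by simp : sepIdx rest ++ [(rest.length : Int)] ≠ [])
      have hs0 : 0 ≤ s0 := hS s0 (by rw [hSc]; exact List.mem_cons_self ..)
      have hss : ∀ x ∈ ss, 0 ≤ x := fun x hx => hS x (by rw [hSc]; exact List.mem_cons_of_mem _ hx)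
      have hb : (-1 : Int) :: (sepIdx (l :: rest) ++ [(((l :: rest) : List String).length : Int)]) =
          -1 :: (s0 + 1) :: ss.map (· + 1) := by
        have h1 : sepIdx (l :: rest) ++ [(((l :: rest) : List String).length : Int)] =
            (sepIdx rest ++ [(rest.length : Int)]).map (· + 1) := by
          simp [sepIdx_cons, hl]
        rw [List.cons_eq_cons]
        exact ⟨rfl, by rw [h1, hSc]; simp⟩
      rw [hb, slicesB_cons, (by omega : (-1 : Int) + 1 = 0), slice_cons_zero l rest s0 hs0]
      have : slicesB (l :: rest) ((s0 + 1) :: ss.map (· + 1)) = slicesB rest (s0 :: ss) := by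
        rw [show (s0 + 1) :: ss.map (· + 1) = (s0 :: ss).map (· + 1) by simp]
        exact slicesB_shift l rest _ (fun x hx => le_trans (by omega)
          (hS x (hSc ▸ hx))) (fun x hx => hss x hx)
      rw [this]
      have hgr : groups rest = PySem.List.slice rest (some 0) (some s0) :: slicesB rest (s0 :: ss) := by
        rw [← ih, hSc, slicesB_cons, (by omega : (-1 : Int) + 1 = 0)]
      simp [groups, hl, hgr]

theorem parse_alt_eq_groups (input : List String) :
    parse_alt input = (groups input).map (List.map lineChars) := by
  rw [← slicesB_eq_groups input]
  simp [parse_alt, slicesB, List.map_map]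

-- ===== VERDICT (by name: the statement is the Claim_ definition above) =====
theorem parse_spec : Claim_equal_parse := by
  intro input _
  show parse input = parse_alt input
  rw [parse_eq_groups, parse_alt_eq_groups]
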